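-- pv_equiv track=rewrite | github.com/Arsen1302/Code-copy-detector | TestData/solutions/problem_1651_5.py | solution_1651_5
-- ===== SOURCE A (Python) =====
-- from typing import List
--
-- def solution_1651_5(nums: List[int], queries: List[int]) -> List[int]:
--
--     ans = []
--
--     nums.sort()
--     sumx = []
--     res = 0
--     for x in nums:
--         res += x
--         sumx.append(res)
--
--     for j in range(len(queries)):
--         for i, y in enumerate(sumx):
--             if y <= queries[j]:
--                 continue
--             else:
--                 ans.append(i)
--                 break
--         else:
--             if len(ans) < j + 1:
--                 ans.append(len(nums))
--
--     return ans
-- ===== SOURCE B (Python) =====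
-- from typing import List
--
-- def solution_1651_5(nums: List[int], queries: List[int]) -> List[int]:
--     # sort in place (same observable mutation as the original), then binary-search
--     # the running-max of prefix sums (nondecreasing even with negative numbers)
--     nums.sort()
--     pmax = []
--     s = 0
--     m = None
--     for x in nums:
--         s += x
--         m = s if (m is None or s > m) else m
--         pmax.append(m)
--     n = len(nums)
--     ans = []
--     for q in queries:
--         lo, hi = 0, n
--         while lo < hi:
--             mid = (lo + hi) // 2
--             if pmax[mid] <= q:
--                 lo = mid + 1
--             else:
--                 hi = mid
--         ans.append(lo)
--     return ans
-- ===== Notes on version B (the rewrite author's own statement) =====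
-- stated objective: faster
-- what changed: Replaces A's per-query linear scan of the prefix-sum list by a hand-written binary search over the running maximum of the prefix sums (nondecreasing even with negative numbers), turning O(m*n) into O((n+m) log n).
import Mathlib
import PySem

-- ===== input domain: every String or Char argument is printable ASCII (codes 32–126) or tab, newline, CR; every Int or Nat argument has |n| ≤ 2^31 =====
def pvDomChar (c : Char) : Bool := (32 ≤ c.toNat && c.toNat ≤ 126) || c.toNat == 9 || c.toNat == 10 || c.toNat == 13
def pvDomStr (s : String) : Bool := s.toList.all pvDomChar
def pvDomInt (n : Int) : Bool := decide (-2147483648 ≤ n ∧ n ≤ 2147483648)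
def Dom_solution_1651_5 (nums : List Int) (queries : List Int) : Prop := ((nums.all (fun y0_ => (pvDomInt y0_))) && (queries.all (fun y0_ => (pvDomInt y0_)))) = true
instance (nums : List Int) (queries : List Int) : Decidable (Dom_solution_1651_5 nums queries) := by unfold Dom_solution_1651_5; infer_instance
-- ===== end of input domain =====

-- B replaces A's per-query linear scan over the prefix sums by a binary search over
-- the running maximum of the prefix sums (nondecreasing even with negative numbers):
-- O((n+m)·log n) instead of O(m·n). Both A and B sort `nums` in place (same mutation);
-- the equivalence proved here is about the return value.

-- ===== PORT A =====
-- inner 'for i, y in enumerate(sumx): if y <= q: continue else: append(i); break'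
def fgFirst : List Int → Int → Nat → Option Nat
  | [], _, _ => none
  | y :: ys, q, i => if y ≤ q then fgFirst ys q (i + 1) else some i

-- outer 'for j in range(len(queries))' loop with the for-else clause
def aOuter (sumx : List Int) (n : Nat) : List Int → Nat → List Int → List Int
  | [], _, ans => ans
  | q :: qs, j, ans =>
    match fgFirst sumx q 0 with
    | some i => aOuter sumx n qs (j + 1) (ans ++ [(i : Int)])
    | none => aOuter sumx n qs (j + 1) (if ans.length < j + 1 then ans ++ [(n : Int)] else ans)

def solution_1651_5 (nums : List Int) (queries : List Int) : List Int :=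
  let ns := PySem.List.sorted nums (fun x => x) false
  let sumx := (ns.foldl (fun (st : Int × List Int) x => (st.1 + x, st.2 ++ [st.1 + x])) (0, [])).2
  aOuter sumx ns.length queries 0 []

-- ===== PORT B =====
-- 'for x in nums: s += x; m = s if (m is None or s > m) else m; pmax.append(m)'
def pmaxLoop : List Int → Int → Option Int → List Int → List Int
  | [], _, _, acc => acc
  | x :: xs, s, m, acc =>
    let s' := s + x
    let m' := match m with
      | none => s'
      | some m0 => if s' > m0 then s' else m0
    pmaxLoop xs s' (some m') (acc ++ [m'])

-- 'while lo < hi: mid = (lo+hi)//2; if pmax[mid] <= q: lo = mid+1 else: hi = mid'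
-- (pmax[mid] is in range on every call made: lo ≤ mid < hi ≤ len(pmax))
def bsLoop (pmax : List Int) (q : Int) (lo hi : Nat) : Nat :=
  if lo < hi then
    let mid := (lo + hi) / 2
    if pmax.getD mid 0 ≤ q then bsLoop pmax q (mid + 1) hi else bsLoop pmax q lo mid
  else lo
termination_by hi - lo
decreasing_by all_goals omega

def solution_1651_5_alt (nums : List Int) (queries : List Int) : List Int :=
  let ns := PySem.List.sorted nums (fun x => x) false
  let pmax := pmaxLoop ns 0 none []
  queries.foldl (fun ans q => ans ++ [(bsLoop pmax q 0 ns.length : Int)]) []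

-- ===== PRECONDITION & SPEC =====
def Spec_solution_1651_5 (nums : List Int) (queries : List Int) (out : List Int) : Prop := out = solution_1651_5_alt nums queries
instance (nums : List Int) (queries : List Int) (out : List Int) : Decidable (Spec_solution_1651_5 nums queries out) := by unfold Spec_solution_1651_5; infer_instance

-- ===== CLAIM (what is proved, stated in full; the proofs are below) =====
def Claim_equal_solution_1651_5 : Prop := ∀ (nums : List Int) (queries : List Int), Dom_solution_1651_5 nums queries → Spec_solution_1651_5 nums queries (solution_1651_5 nums queries)

-- ===== LEMMAS AND PROOFS =====

-- mathematical spec of A's prefix-sum list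
def psums : Int → List Int → List Int
  | _, [] => []
  | r, x :: xs => (r + x) :: psums (r + x) xs

-- mathematical spec of B's running-max list
def pmaxs : Int → Option Int → List Int → List Int
  | _, _, [] => []
  | r, m, x :: xs =>
    let s' := r + x
    let m' := match m with
      | none => s'
      | some m0 => if s' > m0 then s' else m0
    m' :: pmaxs s' (some m') xs

-- number of prefix sums ≤ q: the value both programs compute per query
def cnt (l : List Int) (q : Int) : Nat := (l.takeWhile (fun y => decide (y ≤ q))).length

lemma foldA_eq (l : List Int) : ∀ (r : Int) (acc : List Int),
    (l.foldl (fun (st : Int × List Int) x => (st.1 + x, st.2 ++ [st.1 + x])) (r, acc)).2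
      = acc ++ psums r l := by
  induction l with
  | nil => simp [psums]
  | cons x xs ih => intro r acc; simp [psums, ih, List.append_assoc]

lemma pmaxLoop_eq (l : List Int) : ∀ (s : Int) (m : Option Int) (acc : List Int),
    pmaxLoop l s m acc = acc ++ pmaxs s m l := by
  induction l with
  | nil => simp [pmaxLoop, pmaxs]
  | cons x xs ih => intro s m acc; simp [pmaxLoop, pmaxs, ih, List.append_assoc]

lemma psums_length (l : List Int) : ∀ r, (psums r l).length = l.length := by
  induction l with
  | nil => simp [psums]
  | cons x xs ih => intro r; simp [psums, ih]

lemma pmaxs_length (l : List Int) : ∀ r m, (pmaxs r m l).length = l.length := by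
  induction l with
  | nil => simp [pmaxs]
  | cons x xs ih => intro r m; simp [pmaxs, ih]

lemma cnt_le_length (l : List Int) (q : Int) : cnt l q ≤ l.length :=
  (List.takeWhile_prefix _).length_le

lemma cnt_getElem_le (l : List Int) (q : Int) (j : Nat) (hj : j < cnt l q) :
    l[j]'(lt_of_lt_of_le hj (cnt_le_length l q)) ≤ q := by
  have hpre := List.takeWhile_prefix (l := l) (fun y => decide (y ≤ q))
  have hget := hpre.getElem (i := j) hj
  have hmem : (l.takeWhile (fun y => decide (y ≤ q)))[j] ∈ l.takeWhile (fun y => decide (y ≤ q)) :=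
    List.getElem_mem hj
  have := List.mem_takeWhile_imp hmem
  rw [hget] at this
  exact of_decide_eq_true this

lemma takeWhile_getElem_false (p : Int → Bool) :
    ∀ (l : List Int) (h : (l.takeWhile p).length < l.length),
      p (l[(l.takeWhile p).length]) = false := by
  intro l
  induction l with
  | nil => simp
  | cons x xs ih =>
    intro h
    by_cases hx : p x = true
    · simp only [List.takeWhile_cons, hx, if_true] at h ⊢
      simpa using ih (by simpa using h)
    · simp only [List.takeWhile_cons, hx, if_false] at h ⊢
      simpa using eq_false_of_ne_true hx

lemma cnt_getElem_gt (l : List Int) (q : Int) (h : cnt l q < l.length) :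
    q < l[cnt l q] := by
  have := takeWhile_getElem_false (fun y => decide (y ≤ q)) l h
  simp only [decide_eq_false_iff_not, not_le] at this
  exact this

lemma fgFirst_eq (q : Int) : ∀ (l : List Int) (i : Nat),
    fgFirst l q i = if cnt l q < l.length then some (i + cnt l q) else none := by
  intro l
  induction l with
  | nil => intro i; simp [fgFirst, cnt]
  | cons y ys ih =>
    intro i
    by_cases hy : y ≤ q
    · have hc : cnt (y :: ys) q = cnt ys q + 1 := by
        simp [cnt, List.takeWhile_cons, hy]
      rw [show fgFirst (y :: ys) q i = fgFirst ys q (i + 1) by simp [fgFirst, hy], ih, hc]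
      by_cases h : cnt ys q < ys.length
      · rw [if_pos h, if_pos (by simpa using Nat.succ_lt_succ h)]
        congr 1; omega
      · rw [if_neg h, if_neg (by simp; omega)]
    · have hc : cnt (y :: ys) q = 0 := by simp [cnt, List.takeWhile_cons, hy]
      rw [show fgFirst (y :: ys) q i = some i by simp [fgFirst, hy], hc]
      rw [if_pos (by simp)]
      simp

lemma aOuter_eq (sumx : List Int) : ∀ (qs : List Int) (j : Nat) (ans : List Int),
    ans.length = j →
    aOuter sumx sumx.length qs j ans = ans ++ qs.map (fun q => (cnt sumx q : Int)) := by
  intro qs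
  induction qs with
  | nil => intro j ans _; simp [aOuter]
  | cons q qs ih =>
    intro j ans hlen
    rw [show aOuter sumx sumx.length (q :: qs) j ans =
        (match fgFirst sumx q 0 with
        | some i => aOuter sumx sumx.length qs (j + 1) (ans ++ [(i : Int)])
        | none => aOuter sumx sumx.length qs (j + 1)
            (if ans.length < j + 1 then ans ++ [(sumx.length : Int)] else ans)) from rfl]
    rw [fgFirst_eq]
    by_cases h : cnt sumx q < sumx.length
    · rw [if_pos h]
      simp only []
      rw [ih (j + 1) _ (by simp [hlen])]
      simp [List.append_assoc]
    · rw [if_neg h]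
      have hguard : ans.length < j + 1 := by omega
      simp only [hguard, if_pos]
      rw [ih (j + 1) _ (by simp [hlen])]
      have : cnt sumx q = sumx.length := le_antisymm (cnt_le_length _ _) (by omega)
      simp [this, List.append_assoc]

lemma pmaxs_chain : ∀ (l : List Int) (r m : Int),
    List.IsChain (· ≤ ·) (m :: pmaxs r (some m) l) := by
  intro l
  induction l with
  | nil => intro r m; simp [pmaxs]
  | cons x xs ih =>
    intro r m
    have hm' : m ≤ (if r + x > m then r + x else m) := by split <;> omega
    simpa [pmaxs] using List.IsChain.cons_cons hm' (ih (r + x) _)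

lemma pmaxs_sorted (l : List Int) (r : Int) :
    (pmaxs r none l).Pairwise (· ≤ ·) := by
  cases l with
  | nil => simp [pmaxs]
  | cons x xs =>
    have h := pmaxs_chain xs (r + x) (r + x)
    simpa [pmaxs] using h.pairwise

lemma cnt_pmaxs_some (q : Int) : ∀ (l : List Int) (r m : Int), m ≤ q →
    cnt (pmaxs r (some m) l) q = cnt (psums r l) q := by
  intro l
  induction l with
  | nil => intro r m _; simp [pmaxs, psums]
  | cons x xs ih =>
    intro r m hm
    by_cases hs : r + x ≤ q
    · have hm' : (if r + x > m then r + x else m) ≤ q := by split <;> omega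
      simp [pmaxs, psums, cnt, List.takeWhile_cons, hs, decide_eq_true hm']
      have := ih (r + x) _ hm'
      simpa [cnt] using this
    · have hm' : ¬ (if r + x > m then r + x else m) ≤ q := by
        split <;> omega
      simp [pmaxs, psums, cnt, List.takeWhile_cons, hs, hm']

lemma cnt_pmaxs_none (q : Int) (l : List Int) (r : Int) :
    cnt (pmaxs r none l) q = cnt (psums r l) q := by
  cases l with
  | nil => simp [pmaxs, psums]
  | cons x xs =>
    by_cases hs : r + x ≤ q
    · simp only [pmaxs, psums, cnt, List.takeWhile_cons, decide_eq_true hs, if_true,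
        List.length_cons]
      have := cnt_pmaxs_some q xs (r + x) (r + x) hs
      simpa [cnt] using this
    · simp [pmaxs, psums, cnt, List.takeWhile_cons, hs]

lemma pairwise_le_getElem (l : List Int) (hs : l.Pairwise (· ≤ ·)) (i j : Nat)
    (hij : i ≤ j) (hj : j < l.length) : l[i]'(by omega) ≤ l[j] := by
  rcases Nat.lt_or_ge i j with h | h
  · exact List.pairwise_iff_getElem.mp hs i j (by omega) hj h
  · have : i = j := by omega
    subst this; rfl

lemma bsLoop_eq (pmax : List Int) (q : Int) (hs : pmax.Pairwise (· ≤ ·)) :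
    ∀ (k lo hi : Nat), hi - lo ≤ k → lo ≤ cnt pmax q → cnt pmax q ≤ hi →
      hi ≤ pmax.length → bsLoop pmax q lo hi = cnt pmax q := by
  intro k
  induction k with
  | zero =>
    intro lo hi hk h1 h2 _
    rw [bsLoop, if_neg (by omega)]
    omega
  | succ k ih =>
    intro lo hi hk h1 h2 hlen
    by_cases hlt : lo < hi
    · have hmid1 : lo ≤ (lo + hi) / 2 := by omega
      have hmid2 : (lo + hi) / 2 < hi := by omega
      have hmlen : (lo + hi) / 2 < pmax.length := by omega
      rw [bsLoop, if_pos hlt]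
      simp only []
      rw [List.getD_eq_getElem pmax 0 hmlen]
      by_cases hle : pmax[(lo + hi) / 2] ≤ q
      · rw [if_pos hle]
        have hcnt : (lo + hi) / 2 < cnt pmax q := by
          by_contra hc
          push_neg at hc
          have hclen : cnt pmax q < pmax.length := by omega
          have := cnt_getElem_gt pmax q hclen
          have := pairwise_le_getElem pmax hs (cnt pmax q) ((lo + hi) / 2) hc hmlen
          omega
        exact ih ((lo + hi) / 2 + 1) hi (by omega) (by omega) h2 hlen
      · rw [if_neg hle]
        have hcnt : cnt pmax q ≤ (lo + hi) / 2 := by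
          by_contra hc
          push_neg at hc
          exact hle (cnt_getElem_le pmax q _ hc)
        exact ih lo ((lo + hi) / 2) (by omega) h1 hcnt (by omega)
    · rw [bsLoop, if_neg hlt]; omega

-- ===== VERDICT (by name: the statement is the Claim_ definition above) =====
theorem solution_1651_5_spec : Claim_equal_solution_1651_5 := by
  unfold Claim_equal_solution_1651_5
  intro nums queries _
  unfold Spec_solution_1651_5 solution_1651_5 solution_1651_5_alt
  simp only []
  rw [foldA_eq, pmaxLoop_eq]
  simp only [List.nil_append]
  rw [show (PySem.List.sorted nums (fun x => x) false).length
        = (psums 0 (PySem.List.sorted nums (fun x => x) false)).length from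
      (psums_length _ 0).symm]
  rw [aOuter_eq _ queries 0 [] rfl]
  rw [PySem.List.foldl_append_singleton_eq_map]
  simp only [List.nil_append]
  apply List.map_congr_left
  intro q _
  set ns := PySem.List.sorted nums (fun x => x) false with hns
  have hsorted := pmaxs_sorted ns 0
  have hlen : (pmaxs 0 none ns).length = ns.length := pmaxs_length ns 0 none
  have hcnt := cnt_pmaxs_none q ns 0
  have hb := bsLoop_eq (pmaxs 0 none ns) q hsorted ((psums 0 ns).length) 0
      ((psums 0 ns).length)
      (by omega)
      (Nat.zero_le _)
      (by rw [hcnt]; exact cnt_le_length _ _)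
      (by rw [hlen, psums_length])
  rw [hb, hcnt]
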